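-- pv_equiv track=rewrite | github.com/IDilettant/AVITO-matrix-spiral-traversal | spiral_traversal/solution.py | _is_right_format
-- ===== SOURCE A (Python) =====
-- def _is_right_format(matrix: str) -> bool:  # noqa: WPS210
--     """Check the matrix format for compliance with the expected.
--
--     Args:
--         matrix: graphical representation of the matrix
--
--     Returns:
--         bool
--
--     Expected format example:
--         +-----+-----+
--         |  10 |  20 |
--         +-----+-----+
--         |  30 |  40 |
--         +-----+-----+
--     """
--     if isinstance(matrix, str) and matrix:
--         checks = []
--         matrix_lines = matrix.strip().split('\n')
--         upper_borderline = matrix_lines[0]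
--         size = len([char for char in upper_borderline.split('+') if char != ''])
--         for index, line in enumerate(matrix_lines):
--             if index % 2 == 0:
--                 checks.append(line == upper_borderline)
--             if index % 2 == 1:
--                 checks.append(
--                     len(
--                         [
--                             int(char)
--                             for char in line.split(' ')
--                             if char.isdigit()
--                         ],
--                     ) == size,
--                 )
--         return all(checks)
--     return False
-- ===== SOURCE B (Python) =====
-- def _is_right_format(matrix):
--     if not (isinstance(matrix, str) and matrix):
--         return False
--     lines = matrix.strip().split('\n')
--     border = lines[0]
--     size = sum(1 for piece in border.split('+') if piece)
--     ok = True
--     while lines: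
--         ok = ok and lines[0] == border
--         if len(lines) > 1:
--             ok = ok and sum(1 for tok in lines[1].split(' ') if tok.isdigit()) == size
--         lines = lines[2:]
--     return ok
-- ===== Notes on version B (the rewrite author's own statement) =====
-- stated objective: alternative
-- what changed: B replaces A's single enumerate loop with index-parity branches appending to a checks list by a short-circuiting while loop that consumes two lines per iteration (border line, then digit row), and counts digit tokens with sum(1 for ...) instead of materializing a list of int conversions.
import Mathlib
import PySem

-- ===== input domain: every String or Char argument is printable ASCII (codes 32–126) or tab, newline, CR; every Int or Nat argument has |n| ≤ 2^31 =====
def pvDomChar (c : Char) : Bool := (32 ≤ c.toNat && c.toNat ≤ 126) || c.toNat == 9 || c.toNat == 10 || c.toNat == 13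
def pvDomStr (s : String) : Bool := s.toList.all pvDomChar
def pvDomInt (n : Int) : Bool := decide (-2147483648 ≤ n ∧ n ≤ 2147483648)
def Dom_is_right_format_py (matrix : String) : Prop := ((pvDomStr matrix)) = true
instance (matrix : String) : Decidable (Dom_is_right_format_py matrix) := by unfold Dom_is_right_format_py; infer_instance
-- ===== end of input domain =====

-- B replaces A's single enumerate loop with parity branches by a while loop consuming two
-- lines per step, and counts digit tokens instead of building a list of ints (objective:
-- alternative; same cost).

-- ===== PORT A =====
-- A's row check: len([int(char) for char in line.split(' ') if char.isdigit()]) == size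
def pvRowA (line : List Char) (size : Nat) : Bool :=
  (((PySem.Chars.splitOn line [' ']).filter (fun t => PySem.Chars.strIsdigit t)).map
      (fun t => PySem.Int.ofChars? t)).length == size

def is_right_format_py (matrix : String) : Bool :=
  if matrix.toList ≠ [] then
    let matrix_lines := PySem.Chars.splitOn (PySem.Chars.strip matrix.toList) ['\n']
    let upper_borderline := matrix_lines.headD []   -- matrix_lines[0]; split always returns ≥ 1 piece
    let size := ((PySem.Chars.splitOn upper_borderline ['+']).filter (fun c => c ≠ [])).length
    let checks := (PySem.List.enumerate matrix_lines 0).foldl (fun acc p =>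
        let acc := if PySem.Int.mod p.1 2 == 0 then acc ++ [p.2 == upper_borderline] else acc
        if PySem.Int.mod p.1 2 == 1 then acc ++ [pvRowA p.2 size] else acc) []
    checks.all id
  else false

-- ===== PORT B =====
-- B's row check: sum(1 for tok in line.split(' ') if tok.isdigit()) == size
def pvRowB (line : List Char) (size : Nat) : Bool :=
  (PySem.Chars.splitOn line [' ']).countP (fun t => PySem.Chars.strIsdigit t) == size

-- the while loop: consumes two lines per iteration (lines = lines[2:])
def pvLoopB (border : List Char) (size : Nat) (ok : Bool) : List (List Char) → Bool
  | [] => ok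
  | l :: rest =>
      let ok := ok && (l == border)
      let ok := match rest with
        | r :: _ => ok && pvRowB r size
        | [] => ok
      pvLoopB border size ok (rest.drop 1)
  termination_by ls => ls.length
  decreasing_by simp

def is_right_format_py_alt (matrix : String) : Bool :=
  if matrix.toList ≠ [] then
    let lines := PySem.Chars.splitOn (PySem.Chars.strip matrix.toList) ['\n']
    let border := lines.headD []
    let size := ((PySem.Chars.splitOn border ['+']).filter (fun c => c ≠ [])).length 
    pvLoopB border size true lines
  else false

-- ===== PRECONDITION & SPEC =====
def Spec_is_right_format_py (matrix : String) (out : Bool) : Prop := out = is_right_format_py_alt matrix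
instance (matrix : String) (out : Bool) : Decidable (Spec_is_right_format_py matrix out) := by unfold Spec_is_right_format_py; infer_instance

-- ===== CLAIM (what is proved, stated in full; the proofs are below) =====
def Claim_equal_is_right_format_py : Prop := ∀ (matrix : String), Dom_is_right_format_py matrix → Spec_is_right_format_py matrix (is_right_format_py matrix)

-- ===== LEMMAS AND PROOFS =====

theorem rowA_eq_rowB (line : List Char) (size : Nat) : pvRowA line size = pvRowB line size := by
  simp [pvRowA, pvRowB, List.countP_eq_length_filter]

theorem loopB_ok (border : List Char) (size : Nat) :
    ∀ (ls : List (List Char)) (ok : Bool),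
      pvLoopB border size ok ls = (ok && pvLoopB border size true ls)
  | [], ok => by simp [pvLoopB]
  | [l], ok => by cases ok <;> simp [pvLoopB]
  | l :: r :: rs, ok => by
      rw [pvLoopB, pvLoopB]
      simp only [List.drop]
      rw [loopB_ok border size rs, loopB_ok border size rs]
      cases ok
      · simp
      · simp only [Bool.true_and, Bool.and_assoc]
        conv_rhs => rw [loopB_ok border size rs]
        simp [Bool.and_assoc]
  termination_by ls => ls.length

theorem main_loop (border : List Char) (size : Nat) :
    ∀ (ls : List (List Char)) (n : Nat) (acc : List Bool),
    (((PySem.List.enumerate ls (2*(n:Int))).foldl (fun acc p =>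
        let acc := if PySem.Int.mod p.1 2 == 0 then acc ++ [p.2 == border] else acc
        if PySem.Int.mod p.1 2 == 1 then acc ++ [pvRowA p.2 size] else acc) acc).all id)
      = (acc.all id && pvLoopB border size true ls)
  | [], n, acc => by simp [PySem.List.enumerate_nil, pvLoopB]
  | [l], n, acc => by
      have h0 : PySem.Int.mod (2*(n:Int)) 2 = 0 := by
        rw [PySem.Int.mod_eq_emod_of_pos (by omega)]; omega
      rw [PySem.List.enumerate_cons, PySem.List.enumerate_nil]
      simp [pvLoopB, List.all_append]
  | l :: r :: rs, n, acc => by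
      have h0 : PySem.Int.mod (2*(n:Int)) 2 = 0 := by
        rw [PySem.Int.mod_eq_emod_of_pos (by omega)]; omega
      have h1 : PySem.Int.mod (2*(n:Int)+1) 2 = 1 := by
        rw [PySem.Int.mod_eq_emod_of_pos (by omega)]; omega
      have hcast : (2*(n:Int)+1+1) = 2*(((n+1:Nat)):Int) := by push_cast; ring
      rw [PySem.List.enumerate_cons, PySem.List.enumerate_cons]
      simp only [List.foldl_cons, h0, h1]
      rw [hcast, main_loop border size rs (n+1)]
      rw [pvLoopB]
      simp only [List.drop_one, List.tail_cons]
      rw [loopB_ok border size rs]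
      conv_rhs => rw [loopB_ok border size rs]
      simp [rowA_eq_rowB, List.all_append, Bool.and_assoc]
  termination_by ls => ls.length

-- ===== VERDICT (by name: the statement is the Claim_ definition above) =====
theorem is_right_format_py_spec : Claim_equal_is_right_format_py := by
  unfold Claim_equal_is_right_format_py
  intro matrix _
  unfold Spec_is_right_format_py is_right_format_py is_right_format_py_alt
  by_cases h : matrix.toList = []
  · simp [h]
  · simp only [h, ne_eq, not_false_eq_true, if_pos]
    have := main_loop
      ((PySem.Chars.splitOn (PySem.Chars.strip matrix.toList) ['\n']).headD [])
      (((PySem.Chars.splitOn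
          ((PySem.Chars.splitOn (PySem.Chars.strip matrix.toList) ['\n']).headD []) ['+']).filter
            (fun c => c ≠ [])).length)
      (PySem.Chars.splitOn (PySem.Chars.strip matrix.toList) ['\n']) 0 []
    simp only [Nat.cast_zero, mul_zero, List.all_nil, Bool.true_and] at this
    exact this
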